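-- pv_equiv track=rewrite | github.com/alaminjwel/code-base | python/2218. (HARD) Maximum Value of K Coins From Piles.py | maxValueOfCoins
-- ===== SOURCE A (Python) =====
-- from typing import List
--
-- def maxValueOfCoins(piles: List[List[int]], k: int) -> int:
--     n = len(piles)
--     # Compute the total value of coins that can be collected from the first j coins of pile i
--     pile_values = [[0] * (len(p)+1) for p in piles]
--     for i in range(n):
--         for j in range(1, len(piles[i])+1):
--             pile_values[i][j] = pile_values[i][j-1] + piles[i][j-1]
--
--     # Initialize the dynamic programming table
--     dp = [[0] * (k+1) for _ in range(n+1)]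
--
--     # Fill the dynamic programming table
--     for i in range(1, n+1):
--         for j in range(1, k+1):
--             for x in range(min(j, len(piles[i-1]))+1):
--                 dp[i][j] = max(dp[i][j], dp[i-1][j-x] + pile_values[i-1][x])
--
--     # Return the final result
--     return dp[n][k]
-- ===== SOURCE B (Python) =====
-- def maxValueOfCoins(piles, k):
--     memo = {}
--     get = memo.get
--
--     def best(i, j):
--         if i == 0:
--             return 0
--         key = (i, j)
--         v = get(key)
--         if v is not None:
--             return v
--         pile = piles[i - 1]
--         i -= 1
--         res = get((i, j))
--         if res is None:
--             res = best(i, j)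
--         cur = 0
--         for x in range(1, min(j, len(pile)) + 1):
--             cur += pile[x - 1]
--             v = get((i, j - x))
--             if v is None:
--                 v = best(i, j - x)
--             v += cur
--             if v > res:
--                 res = v
--         memo[key] = res
--         return res
--
--     return best(len(piles), k)
-- ===== Notes on version B (the rewrite author's own statement) =====
-- stated objective: alternative
-- what changed: B solves the problem top-down: a memoized recursion best(i, j) over (piles considered, remaining budget) with the prefix sum accumulated inline, evaluating only reachable states, instead of A's bottom-up fill of a precomputed prefix-sum table and a full (n+1)x(k+1) dp matrix.
import Mathlib
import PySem

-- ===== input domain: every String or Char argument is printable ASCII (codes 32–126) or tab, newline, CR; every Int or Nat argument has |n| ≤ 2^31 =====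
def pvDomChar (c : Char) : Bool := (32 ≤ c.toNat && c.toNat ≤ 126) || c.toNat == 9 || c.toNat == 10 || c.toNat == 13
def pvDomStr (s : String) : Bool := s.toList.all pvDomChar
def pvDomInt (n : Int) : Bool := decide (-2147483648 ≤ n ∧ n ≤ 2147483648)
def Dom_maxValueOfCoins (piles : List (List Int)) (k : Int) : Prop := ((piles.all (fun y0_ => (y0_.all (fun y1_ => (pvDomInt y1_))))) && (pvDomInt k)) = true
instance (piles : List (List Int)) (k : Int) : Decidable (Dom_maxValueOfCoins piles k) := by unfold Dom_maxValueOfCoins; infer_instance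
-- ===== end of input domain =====

-- B replaces A's bottom-up fill of a precomputed prefix-sum table and a full (n+1)×(k+1) dp matrix
-- by a top-down memoized recursion best(i, j) over (piles considered, remaining budget) with the
-- prefix sum accumulated inline (objective: alternative decomposition; same worst-case cost).

-- ===== PORT A =====
-- helper: the loop building pile_values[i] (python: for j in range(1, len+1): pv[j] = pv[j-1] + p[j-1];
-- the loop counter here is python's j-1, the same traversal)
def pvRowA (p : List Int) : List Int :=
  (List.range p.length).foldl
    (fun pv j => pv.set (j+1) (pv.getD j 0 + p.getD j 0))
    (List.replicate (p.length + 1) (0:Int))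

-- the body of A's innermost loop: dp[i][j] = max(dp[i][j], dp[i-1][j-x] + pile_values[i-1][x])
-- (here i counts from 0, so rows i and i+1; indices are in range on Pre_, reads use getD)
def pvInnerStepA (pv : List Int) (i j : Nat) (dp : List (List Int)) (x : Nat) : List (List Int) :=
  dp.set (i+1) ((dp.getD (i+1) []).set j
    (max ((dp.getD (i+1) []).getD j 0) ((dp.getD i []).getD (j - x) 0 + pv.getD x 0)))

-- A's loop over x: for x in range(min(j, len(piles[i-1]))+1)
def pvMidStepA (q pv : List Int) (i : Nat) (dp : List (List Int)) (j : Nat) : List (List Int) :=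
  (List.range (min j q.length + 1)).foldl (pvInnerStepA pv i j) dp

-- A's loop over j: for j in range(1, k+1)
def pvOutStepA (kn : Nat) (piles pile_values : List (List Int)) (dp : List (List Int)) (i : Nat) : List (List Int) :=
  (List.range' 1 kn).foldl (pvMidStepA (piles.getD i []) (pile_values.getD i []) i) dp

def maxValueOfCoins (piles : List (List Int)) (k : Int) : Int :=
  let n := piles.length
  let pile_values := piles.map pvRowA
  let kn := k.toNat
  let dp0 : List (List Int) := List.replicate (n+1) (List.replicate (kn+1) (0:Int))
  let dp := (List.range n).foldl (pvOutStepA kn piles pile_values) dp0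
  (dp.getD n []).getD kn 0

-- ===== PORT B =====
-- best(i, j) of Source B: memoized recursion, the memo dict threaded through the calls in call order.
-- pvLookupOr is Source B's "v = get((i, j)); if v is None: v = best(i, j)" fast path.
-- python's piles[i-1] is pyGet? at i-1 (the recursion only ever calls it with 1 ≤ i ≤ len(piles),
-- so the .getD [] default is never taken from the top-level call)
mutual
def pvLookupOr (piles : List (List Int)) (i : Nat) (j : Int) (memo : PySem.Dict (Int × Int) Int) : Int × PySem.Dict (Int × Int) Int :=
  match PySem.Dict.get? memo ((i : Int), j) with
  | some v => (v, memo)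
  | none => pvBestMemo piles i j memo

def pvBestMemo (piles : List (List Int)) : Nat → Int → PySem.Dict (Int × Int) Int → Int × PySem.Dict (Int × Int) Int
  | 0, _, memo => (0, memo)
  | i+1, j, memo =>
    match PySem.Dict.get? memo ((i : Int) + 1, j) with
    | some v => (v, memo)
    | none =>
      let pile := (PySem.List.pyGet? piles (i : Int)).getD []
      let s0 := pvLookupOr piles i j memo
      let s := (PySem.List.pyRange 1 (min j (pile.length : Int) + 1) 1).foldl
        (fun (s : Int × Int × PySem.Dict (Int × Int) Int) x =>
          let cur := s.2.1 + PySem.List.pyGetD pile (x - 1) 0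
          let r := pvLookupOr piles i (j - x) s.2.2
          let v := r.1 + cur
          (if v > s.1 then v else s.1, cur, r.2)) (s0.1, 0, s0.2)
      (s.1, PySem.Dict.insert s.2.2 ((i : Int) + 1, j) s.1)
end

def maxValueOfCoins_alt (piles : List (List Int)) (k : Int) : Int :=
  (pvBestMemo piles piles.length k PySem.Dict.empty).1

-- ===== PRECONDITION & SPEC =====
-- Pre_ excludes exactly the inputs on which Python A raises: for k < 0 every dp row is empty
-- (or too short) and the final dp[n][k] is an IndexError.
def Pre_maxValueOfCoins (piles : List (List Int)) (k : Int) : Prop := 0 ≤ k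
instance (piles : List (List Int)) (k : Int) : Decidable (Pre_maxValueOfCoins piles k) := by
  unfold Pre_maxValueOfCoins; infer_instance

def pvWitness_maxValueOfCoins : List (List Int) × Int := ([[1, 100, 3], [7, 8, 9]], 2)

def Spec_maxValueOfCoins (piles : List (List Int)) (k : Int) (out : Int) : Prop := out = maxValueOfCoins_alt piles k
instance (piles : List (List Int)) (k : Int) (out : Int) : Decidable (Spec_maxValueOfCoins piles k out) := by unfold Spec_maxValueOfCoins; infer_instance

-- ===== CLAIM (what is proved, stated in full; the proofs are below) =====
def Claim_equal_maxValueOfCoins : Prop := ∀ (piles : List (List Int)) (k : Int), Dom_maxValueOfCoins piles k → Pre_maxValueOfCoins piles k → Spec_maxValueOfCoins piles k (maxValueOfCoins piles k)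


-- ===== LEMMAS AND PROOFS =====

/- Basic getD/set toolkit -/

theorem pvGetD_set_ne {α : Type} (l : List α) (i j : Nat) (v d : α) (h : i ≠ j) :
    (l.set i v).getD j d = l.getD j d := by
  simp [List.getD_eq_getElem?_getD, List.getElem?_set_ne h]

theorem pvGetD_set_self {α : Type} (l : List α) (i : Nat) (v d : α) (h : i < l.length) :
    (l.set i v).getD i d = v := by
  simp [List.getD_eq_getElem?_getD, h]

theorem pvSet_getD_self {α : Type} (l : List α) (i : Nat) (d : α) (h : i < l.length) :
    l.set i (l.getD i d) = l := by
  rw [List.getD_eq_getElem?_getD, List.getElem?_eq_getElem h]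
  simp [List.set_getElem_self]

theorem pvGetElem_eq_getD {α : Type} (l : List α) (t : Nat) (d : α) (h : t < l.length) :
    l[t] = l.getD t d := by
  rw [List.getD_eq_getElem?_getD, List.getElem?_eq_getElem h]
  rfl

theorem pvGetD_default {α : Type} (l : List α) (t : Nat) (d : α) (h : l.length ≤ t) :
    l.getD t d = d := by
  rw [List.getD_eq_getElem?_getD, List.getElem?_eq_none h]
  rfl

theorem pvGetD_replicate_zero (n t : Nat) : (List.replicate n (0:Int)).getD t 0 = 0 := by
  by_cases h : t < n
  · rw [← pvGetElem_eq_getD _ _ _ (by simpa using h)]; simp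
  · rw [pvGetD_default]; simp; omega

theorem pvGetD_map_rowA (piles : List (List Int)) (m : Nat) (h : m < piles.length) :
    (piles.map pvRowA).getD m [] = pvRowA (piles.getD m []) := by
  rw [List.getD_eq_getElem?_getD, List.getD_eq_getElem?_getD, List.getElem?_map,
    List.getElem?_eq_getElem h]
  simp

theorem pvTake_succ {α : Type} (l : List α) (d : α) :
    ∀ (m : Nat), m < l.length → l.take (m+1) = l.take m ++ [l.getD m d] := by
  induction l with
  | nil => intro m h; simp at h
  | cons a l ih =>
    intro m h
    cases m with
    | zero => simp [List.getD_eq_getElem?_getD]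
    | succ m =>
      simp only [List.take_succ_cons, List.cons_append]
      rw [ih m (by simpa using h)]
      simp [List.getD_eq_getElem?_getD]

/- Prefix sums -/

def pvPref (p : List Int) (x : Nat) : Int := (p.take x).sum

theorem pvPref_succ (p : List Int) (x : Nat) (h : x < p.length) :
    pvPref p (x+1) = pvPref p x + p.getD x 0 := by
  unfold pvPref
  rw [pvTake_succ p 0 x h]
  simp

theorem pvGetD_map_range (f : Nat → Int) (n t : Nat) (d : Int) (h : t < n) :
    ((List.range n).map f).getD t d = f t := by
  rw [List.getD_eq_getElem?_getD, List.getElem?_eq_getElem (by simpa using h)]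
  simp

theorem pvSet_map_range (f : Nat → Int) (n i : Nat) (v : Int) :
    ((List.range n).map f).set i v = (List.range n).map (fun x => if x = i then v else f x) := by
  apply List.ext_getElem
  · simp
  · intro t h1 h2
    by_cases ht : t = i
    · subst ht
      simp
    · simp [List.getElem_set, ht]
      intro h; exact absurd h.symm ht

theorem pvRowA_loop (p : List Int) (m : Nat) (hm : m ≤ p.length) :
    (List.range m).foldl (fun pv j => pv.set (j+1) (pv.getD j 0 + p.getD j 0))
      (List.replicate (p.length + 1) (0:Int))
    = (List.range (p.length + 1)).map (fun x => if x ≤ m then pvPref p x else 0) := by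
  induction m with
  | zero =>
    apply List.ext_getElem
    · simp
    · intro t h1 h2
      simp only [List.range_zero, List.foldl_nil, List.getElem_replicate, List.getElem_map,
        List.getElem_range]
      split_ifs with h
      · have : t = 0 := by omega
        subst this
        simp [pvPref]
      · rfl
  | succ m ih =>
    rw [List.range_succ, List.foldl_append, ih (by omega), List.foldl_cons, List.foldl_nil]
    rw [pvGetD_map_range _ _ _ _ (by omega), pvSet_map_range]
    apply List.map_congr_left
    intro x hx
    have hx' : x < p.length + 1 := by simpa using hx
    by_cases hxm : x = m+1
    · subst hxm
      simp [pvPref_succ p m (by omega)]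
    · rw [if_neg hxm]
      split_ifs with h1 h2 h3 <;> first | rfl | omega

theorem pvRowA_getD (p : List Int) (x : Nat) (hx : x ≤ p.length) :
    (pvRowA p).getD x 0 = pvPref p x := by
  unfold pvRowA
  rw [pvRowA_loop p p.length le_rfl, pvGetD_map_range _ _ _ _ (by omega)]
  simp [hx]

/- foldl-max toolkit -/

theorem pvLe_foldl_max {α : Type} (L : List α) (f : α → Int) (a : Int) :
    a ≤ L.foldl (fun b x => max b (f x)) a := by
  induction L generalizing a with
  | nil => simp
  | cons x L ih => exact le_trans (le_max_left a (f x)) (ih (max a (f x)))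

theorem pvFoldl_max_congr {α : Type} (L : List α) (f g : α → Int) (h : ∀ x ∈ L, f x = g x) :
    ∀ a, L.foldl (fun b x => max b (f x)) a = L.foldl (fun b x => max b (g x)) a := by
  induction L with
  | nil => intro a; rfl
  | cons x L ih =>
    intro a
    simp only [List.foldl_cons]
    rw [h x (.head _), ih (fun y hy => h y (.tail _ hy))]

/- The common specification: one dp row per pile prefix -/

def pvBest (prev p : List Int) (j : Nat) : Int :=
  (List.range (min j p.length + 1)).foldl (fun a x => max a (prev.getD (j - x) 0 + pvPref p x)) 0

def pvBestL (prev pv : List Int) (lenp : Nat) (j : Nat) : Int :=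
  (List.range (min j lenp + 1)).foldl (fun a x => max a (prev.getD (j - x) 0 + pv.getD x 0)) 0

def pvRowSpec (kn : Nat) (prev p : List Int) : List Int :=
  (List.range (kn+1)).map (pvBest prev p)

def pvIter (piles : List (List Int)) (kn : Nat) : List Int :=
  piles.foldl (fun prev p => pvRowSpec kn prev p) (List.replicate (kn+1) (0:Int))

theorem pvBest_nonneg (prev p : List Int) (j : Nat) : 0 ≤ pvBest prev p j :=
  pvLe_foldl_max _ _ 0

theorem pvBest_zero (prev p : List Int) (h : prev.getD 0 0 = 0) : pvBest prev p 0 = 0 := by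
  unfold pvBest
  rw [Nat.zero_min, List.range_one, List.foldl_cons, List.foldl_nil]
  rw [show (0:Nat) - 0 = 0 from rfl, h]
  simp [pvPref]

def pvGood (kn : Nat) (r : List Int) : Prop :=
  r.length = kn+1 ∧ r.getD 0 0 = 0 ∧ ∀ j, 0 ≤ r.getD j 0

theorem pvRowSpec_length (kn : Nat) (prev p : List Int) : (pvRowSpec kn prev p).length = kn+1 := by
  simp [pvRowSpec]

theorem pvRowSpec_getD (kn : Nat) (prev p : List Int) (t : Nat) (h : t ≤ kn) :
    (pvRowSpec kn prev p).getD t 0 = pvBest prev p t := by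
  unfold pvRowSpec
  rw [pvGetD_map_range _ _ _ _ (by omega)]

theorem pvRowSpec_good (kn : Nat) (prev p : List Int) (h0 : prev.getD 0 0 = 0) :
    pvGood kn (pvRowSpec kn prev p) := by
  refine ⟨pvRowSpec_length kn prev p, ?_, ?_⟩
  · rw [pvRowSpec_getD kn prev p 0 (by omega), pvBest_zero prev p h0]
  · intro j
    by_cases hj : j ≤ kn
    · rw [pvRowSpec_getD kn prev p j hj]; exact pvBest_nonneg prev p j
    · rw [pvGetD_default _ _ _ (by rw [pvRowSpec_length]; omega)]

theorem pvGood_replicate (kn : Nat) : pvGood kn (List.replicate (kn+1) (0:Int)) :=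
  ⟨by simp, pvGetD_replicate_zero _ _, fun j => by rw [pvGetD_replicate_zero]⟩

theorem pvIter_good_aux (kn : Nat) :
    ∀ (ps : List (List Int)) (r : List Int), pvGood kn r →
      pvGood kn (ps.foldl (fun prev p => pvRowSpec kn prev p) r) := by
  intro ps
  induction ps with
  | nil => intro r h; exact h
  | cons p ps ih =>
    intro r h
    exact ih _ (pvRowSpec_good kn r p h.2.1)

theorem pvIter_good (piles : List (List Int)) (kn : Nat) : pvGood kn (pvIter piles kn) :=
  pvIter_good_aux kn piles _ (pvGood_replicate kn)

theorem pvIter_take_succ (piles : List (List Int)) (kn m : Nat) (hm : m < piles.length) :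
    pvIter (piles.take (m+1)) kn = pvRowSpec kn (pvIter (piles.take m) kn) (piles.getD m []) := by
  unfold pvIter
  rw [pvTake_succ piles [] m hm, List.foldl_append, List.foldl_cons, List.foldl_nil]

/- foldl of pointwise sets -/

theorem pvFoldl_set_length (g : Nat → Int) (J : List Nat) :
    ∀ (r : List Int), (J.foldl (fun r s => r.set s (g s)) r).length = r.length := by
  induction J with
  | nil => intro r; rfl
  | cons s J ih => intro r; rw [List.foldl_cons, ih]; simp

theorem pvFoldl_set_getD (g : Nat → Int) (J : List Nat) :
    ∀ (r : List Int) (t : Nat), (∀ s ∈ J, s < r.length) →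
      (J.foldl (fun r s => r.set s (g s)) r).getD t 0 = if t ∈ J then g t else r.getD t 0 := by
  induction J with
  | nil => intro r t _; simp
  | cons s J ih =>
    intro r t hlen
    rw [List.foldl_cons, ih _ t (fun s' hs' => by simpa using hlen s' (.tail _ hs'))]
    by_cases htJ : t ∈ J
    · rw [if_pos htJ, if_pos (List.mem_cons_of_mem _ htJ)]
    · rw [if_neg htJ]
      by_cases hts : t = s
      · subst hts
        rw [if_pos (by simp), pvGetD_set_self _ _ _ _ (hlen t (.head _))]
      · rw [pvGetD_set_ne _ _ _ _ _ (fun h => hts h.symm), if_neg (by simp [hts, htJ])]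

/- A's inner loop -/

theorem pvInnerA (pv : List Int) (i j : Nat) (L : List Nat) :
    ∀ (dp : List (List Int)) (row : List Int),
      i + 1 < dp.length → j < row.length → dp.getD (i+1) [] = row →
      L.foldl (pvInnerStepA pv i j) dp
      = dp.set (i+1) (row.set j
          (L.foldl (fun a x => max a ((dp.getD i []).getD (j - x) 0 + pv.getD x 0)) (row.getD j 0))) := by
  induction L with
  | nil =>
    intro dp row h1 h2 h3
    rw [List.foldl_nil, List.foldl_nil, pvSet_getD_self row j 0 h2, ← h3,
      pvSet_getD_self dp (i+1) [] h1]
  | cons x L ih =>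
    intro dp row h1 h2 h3
    rw [List.foldl_cons, List.foldl_cons]
    have hstep : pvInnerStepA pv i j dp x
        = dp.set (i+1) (row.set j (max (row.getD j 0) ((dp.getD i []).getD (j - x) 0 + pv.getD x 0))) := by
      unfold pvInnerStepA
      rw [h3]
    rw [hstep,
      ih _ _ (by simpa using h1) (by simpa using h2) (pvGetD_set_self _ _ _ _ h1),
      pvGetD_set_ne dp (i+1) i _ [] (by omega),
      pvGetD_set_self row j _ 0 h2, List.set_set, List.set_set]

/- A's middle loop -/

theorem pvMiddleA (prev pv q : List Int) (i : Nat) (J : List Nat) :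
    ∀ (dp : List (List Int)) (row : List Int), J.Nodup →
      i + 1 < dp.length → dp.getD (i+1) [] = row → dp.getD i [] = prev →
      (∀ t ∈ J, t < row.length ∧ row.getD t 0 = 0) →
      J.foldl (pvMidStepA q pv i) dp
      = dp.set (i+1) (J.foldl (fun r t => r.set t (pvBestL prev pv q.length t)) row) := by
  induction J with
  | nil =>
    intro dp row _ h1 h3 _ _
    rw [List.foldl_nil, List.foldl_nil, ← h3, pvSet_getD_self dp (i+1) [] h1]
  | cons j J ih =>
    intro dp row hnd h1 h3 h4 hrow
    rw [List.foldl_cons, List.foldl_cons]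
    have hjrow := hrow j (.head _)
    have hstep : pvMidStepA q pv i dp j = dp.set (i+1) (row.set j (pvBestL prev pv q.length j)) := by
      unfold pvMidStepA
      rw [pvInnerA pv i j _ dp row h1 hjrow.1 h3, h4, hjrow.2]
      rfl
    rw [hstep]
    have hnd' := hnd
    rw [List.nodup_cons] at hnd'
    rw [ih _ _ hnd'.2 (by simpa using h1) (pvGetD_set_self _ _ _ _ h1)
      (by rw [pvGetD_set_ne dp (i+1) i _ [] (by omega)]; exact h4)
      (by
        intro t ht
        refine ⟨by simpa using (hrow t (.tail _ ht)).1, ?_⟩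
        rw [pvGetD_set_ne row j t _ 0 (by intro h; exact hnd'.1 (h ▸ ht))]
        exact (hrow t (.tail _ ht)).2)]
    rw [List.set_set]

/- the new row built by A's middle loop is the spec row -/

theorem pvNewRowA (kn : Nat) (prev q : List Int) (h0 : prev.getD 0 0 = 0) :
    (List.range' 1 kn).foldl (fun r t => r.set t (pvBestL prev (pvRowA q) q.length t))
      (List.replicate (kn+1) (0:Int))
    = pvRowSpec kn prev q := by
  apply List.ext_getElem
  · rw [pvFoldl_set_length]; simp [pvRowSpec]
  · intro t h1 h2
    have hlen : t < kn + 1 := by rw [pvFoldl_set_length] at h1; simpa using h1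
    rw [pvGetElem_eq_getD _ _ 0 h1, pvGetElem_eq_getD _ _ 0 h2,
      pvFoldl_set_getD _ _ _ t (by intro s hs; rw [List.mem_range'_1] at hs; simp; omega),
      pvRowSpec_getD kn prev q t (by omega)]
    by_cases ht : t ∈ List.range' 1 kn
    · rw [if_pos ht]
      unfold pvBestL pvBest
      apply pvFoldl_max_congr
      intro x hx
      rw [List.mem_range] at hx
      rw [pvRowA_getD q x (by omega)]
    · rw [if_neg ht, pvGetD_replicate_zero]
      rw [List.mem_range'_1] at ht
      have : t = 0 := by omega
      subst this
      rw [pvBest_zero prev q h0]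

/- A's outer loop -/

theorem pvOuterA (piles : List (List Int)) (kn : Nat) :
    ∀ (m : Nat), m ≤ piles.length →
      (((List.range m).foldl (pvOutStepA kn piles (piles.map pvRowA))
          (List.replicate (piles.length+1) (List.replicate (kn+1) (0:Int)))).length
        = piles.length + 1)
      ∧ (∀ t, t ≤ m →
          ((List.range m).foldl (pvOutStepA kn piles (piles.map pvRowA))
            (List.replicate (piles.length+1) (List.replicate (kn+1) (0:Int)))).getD t []
          = pvIter (piles.take t) kn)
      ∧ (∀ t, m < t → t ≤ piles.length →
          ((List.range m).foldl (pvOutStepA kn piles (piles.map pvRowA))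
            (List.replicate (piles.length+1) (List.replicate (kn+1) (0:Int)))).getD t []
          = List.replicate (kn+1) (0:Int)) := by
  intro m
  induction m with
  | zero =>
    intro _
    refine ⟨by simp, ?_, ?_⟩
    · intro t ht
      have : t = 0 := by omega
      subst this
      rw [show pvIter (piles.take 0) kn = List.replicate (kn+1) (0:Int) by simp [pvIter]]
      rw [List.range_zero, List.foldl_nil]
      rw [← pvGetElem_eq_getD _ _ _ (by simp)]
      simp
    · intro t _ ht2
      rw [List.range_zero, List.foldl_nil, ← pvGetElem_eq_getD _ _ _ (by simp; omega)]
      simp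
  | succ m ih =>
    intro hm
    obtain ⟨ihlen, ihdone, ihzero⟩ := ih (by omega)
    rw [List.range_succ, List.foldl_append, List.foldl_cons, List.foldl_nil]
    have hmid := pvMiddleA (pvIter (piles.take m) kn) ((piles.map pvRowA).getD m [])
      (piles.getD m []) m (List.range' 1 kn)
      _ (List.replicate (kn+1) (0:Int)) List.nodup_range'
      (by rw [ihlen]; omega) (ihzero (m+1) (by omega) (by omega)) (ihdone m (by omega))
      (by
        intro t ht
        rw [List.mem_range'_1] at ht
        exact ⟨by simp; omega, pvGetD_replicate_zero _ _⟩)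
    rw [pvOutStepA, hmid]
    rw [pvGetD_map_rowA piles m (by omega)]
    rw [pvNewRowA kn (pvIter (piles.take m) kn) (piles.getD m []) (pvIter_good (piles.take m) kn).2.1]
    refine ⟨by simp [ihlen], ?_, ?_⟩
    · intro t ht
      by_cases htm : t = m+1
      · subst htm
        rw [pvGetD_set_self _ _ _ _ (by rw [ihlen]; omega)]
        rw [pvIter_take_succ piles kn m (by omega)]
      · rw [pvGetD_set_ne _ _ _ _ _ (fun h => htm h.symm)]
        exact ihdone t (by omega)
    · intro t ht1 ht2
      rw [pvGetD_set_ne _ _ _ _ _ (by omega)]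
      exact ihzero t (by omega) ht2

theorem pvAEq (piles : List (List Int)) (k : Int) :
    maxValueOfCoins piles k = (pvIter piles k.toNat).getD k.toNat 0 := by
  obtain ⟨-, h2, -⟩ := pvOuterA piles k.toNat piles.length le_rfl
  simp only [maxValueOfCoins]
  rw [h2 piles.length le_rfl, List.take_length]

/- B side: the pure (memo-free) value of best(i, j) -/

def pvGB (piles : List (List Int)) : Nat → Int → Int
  | 0, _ => 0
  | i+1, j =>
    let pile := (PySem.List.pyGet? piles (i : Int)).getD []
    ((PySem.List.pyRange 1 (min j (pile.length : Int) + 1) 1).foldl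
      (fun (s : Int × Int) x =>
        let cur := s.2 + PySem.List.pyGetD pile (x - 1) 0
        let v := pvGB piles i (j - x) + cur
        (if v > s.1 then v else s.1, cur)) (pvGB piles i j, 0)).1

/- memo consistency: every stored value is the pure value of its key -/

def pvMemoOK (piles : List (List Int)) (m : PySem.Dict (Int × Int) Int) : Prop :=
  ∀ q v, PySem.Dict.get? m q = some v → v = pvGB piles q.1.toNat q.2

theorem pvMemoOK_empty (piles : List (List Int)) : pvMemoOK piles PySem.Dict.empty := by
  intro q v h
  rw [PySem.Dict.get?_empty] at h
  exact absurd h (by simp)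

theorem pvMemoOK_insert (piles : List (List Int)) (m : PySem.Dict (Int × Int) Int)
    (i : Nat) (j : Int) (hm : pvMemoOK piles m) :
    pvMemoOK piles (PySem.Dict.insert m ((i : Int) + 1, j) (pvGB piles (i+1) j)) := by
  intro q v h
  rw [PySem.Dict.get?_insert] at h
  by_cases hq : q = ((i : Int) + 1, j)
  · subst hq
    rw [if_pos rfl] at h
    simp only
    rw [show ((i : Int) + 1).toNat = i + 1 from by omega]
    exact (Option.some.inj h).symm
  · rw [if_neg hq] at h
    exact hm q v h

/- the inner loop of pvBestMemo computes the inner loop of pvGB and keeps the memo consistent -/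

theorem pvMemoFold {D : Type} (F : Int → D → Int × D) (P : Int → Int) (OK : D → Prop)
    (pile : List Int) (j : Int)
    (hF : ∀ (j' : Int) (m : D), OK m → (F j' m).1 = P j' ∧ OK (F j' m).2) :
    ∀ (L : List Int) (res cur : Int) (m : D), OK m →
      ((L.foldl (fun (s : Int × Int × D) x =>
          (if (F (j - x) s.2.2).1 + (s.2.1 + PySem.List.pyGetD pile (x - 1) 0) > s.1
           then (F (j - x) s.2.2).1 + (s.2.1 + PySem.List.pyGetD pile (x - 1) 0) else s.1,
           s.2.1 + PySem.List.pyGetD pile (x - 1) 0, (F (j - x) s.2.2).2)) (res, cur, m)).1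
        = (L.foldl (fun (s : Int × Int) x =>
          (if P (j - x) + (s.2 + PySem.List.pyGetD pile (x - 1) 0) > s.1
           then P (j - x) + (s.2 + PySem.List.pyGetD pile (x - 1) 0) else s.1,
           s.2 + PySem.List.pyGetD pile (x - 1) 0)) (res, cur)).1)
      ∧ OK (L.foldl (fun (s : Int × Int × D) x =>
          (if (F (j - x) s.2.2).1 + (s.2.1 + PySem.List.pyGetD pile (x - 1) 0) > s.1
           then (F (j - x) s.2.2).1 + (s.2.1 + PySem.List.pyGetD pile (x - 1) 0) else s.1,
           s.2.1 + PySem.List.pyGetD pile (x - 1) 0, (F (j - x) s.2.2).2)) (res, cur, m)).2.2 := by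
  intro L
  induction L with
  | nil => intro res cur m hm; exact ⟨rfl, hm⟩
  | cons x L ih =>
    intro res cur m hm
    simp only [List.foldl_cons]
    rw [(hF (j - x) m hm).1]
    exact ih _ _ _ (hF (j - x) m hm).2

theorem pvMemoSpec (piles : List (List Int)) :
    ∀ (i : Nat) (j : Int) (m : PySem.Dict (Int × Int) Int), pvMemoOK piles m →
      (pvBestMemo piles i j m).1 = pvGB piles i j ∧ pvMemoOK piles (pvBestMemo piles i j m).2 := by
  intro i
  induction i with
  | zero =>
    intro j m hm
    refine ⟨by simp [pvBestMemo, pvGB], ?_⟩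
    simpa [pvBestMemo] using hm
  | succ i ih =>
    intro j m hm
    have hF : ∀ (j' : Int) (m' : PySem.Dict (Int × Int) Int), pvMemoOK piles m' →
        (pvLookupOr piles i j' m').1 = pvGB piles i j'
          ∧ pvMemoOK piles (pvLookupOr piles i j' m').2 := by
      intro j' m' hm'
      rcases hq : PySem.Dict.get? m' ((i : Int), j') with _ | v
      · simpa [pvLookupOr, hq] using ih j' m' hm'
      · have hv := hm' ((i : Int), j') v hq
        simp only [Int.toNat_natCast] at hv
        simp only [pvLookupOr, hq]
        exact ⟨hv, hm'⟩
    rcases hg : PySem.Dict.get? m ((i : Int) + 1, j) with _ | v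
    · -- cache miss
      obtain ⟨h01, h02⟩ := hF j m hm
      obtain ⟨hf1, hf2⟩ := pvMemoFold (fun j' m' => pvLookupOr piles i j' m') (pvGB piles i)
        (pvMemoOK piles) ((PySem.List.pyGet? piles (i : Int)).getD []) j hF
        (PySem.List.pyRange 1 (min j (((PySem.List.pyGet? piles (i : Int)).getD []).length : Int) + 1) 1)
        (pvLookupOr piles i j m).1 0 (pvLookupOr piles i j m).2 h02
      have hfirst : (pvBestMemo piles (i+1) j m).1 = pvGB piles (i+1) j := by
        simp only [pvBestMemo, hg]
        rw [hf1, h01]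
        simp only [pvGB]
      refine ⟨hfirst, ?_⟩
      have hins := pvMemoOK_insert piles _ i j hf2
      simp only [pvBestMemo, hg] at hfirst ⊢
      rw [hfirst]
      exact hins
    · -- cache hit
      have hv := hm ((i : Int) + 1, j) v hg
      simp only at hv
      rw [show ((i : Int) + 1).toNat = i + 1 from by omega] at hv
      simp only [pvBestMemo, hg]
      exact ⟨hv, hm⟩

/- pvGB equals the shared row spec -/

theorem pvPyGet_in_range (piles : List (List Int)) (i : Nat) (h : i < piles.length) :
    (PySem.List.pyGet? piles (i : Int)).getD [] = piles.getD i [] := by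
  simp [PySem.List.pyGet?, PySem.List.pyIdx?, h, List.getD_eq_getElem?_getD]

theorem pvPureFoldInv (G : Int → Int) (g : Nat → Int) (p : List Int) (j : Int) (mlim : Nat)
    (hml : mlim ≤ p.length)
    (hg : ∀ t, t < mlim → G (j - (1 + (t : Int))) + pvPref p (t+1) = g t) :
    ∀ (m : Nat), m ≤ mlim → ∀ (a : Int),
      ((List.range m).foldl (fun (s : Int × Int) (t : Nat) =>
          (if G (j - (1 + (t : Int))) + (s.2 + PySem.List.pyGetD p (1 + (t : Int) - 1) 0) > s.1
           then G (j - (1 + (t : Int))) + (s.2 + PySem.List.pyGetD p (1 + (t : Int) - 1) 0) else s.1,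
           s.2 + PySem.List.pyGetD p (1 + (t : Int) - 1) 0)) (a, 0))
      = ((List.range m).foldl (fun b t => max b (g t)) a, pvPref p m) := by
  intro m
  induction m with
  | zero => intro _ a; simp [pvPref]
  | succ m ih =>
    intro hm a
    rw [List.range_succ, List.foldl_append, List.foldl_append, ih (by omega) a,
      List.foldl_cons, List.foldl_nil, List.foldl_cons, List.foldl_nil]
    simp only [show (1 : Int) + (m : Int) - 1 = (m : Int) from by omega, PySem.List.pyGetD_natCast]
    rw [show pvPref p m + p.getD m 0 = pvPref p (m+1) from (pvPref_succ p m (by omega)).symm,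
      hg m (by omega)]
    congr 1
    split_ifs <;> omega

theorem pvGB_row (piles : List (List Int)) (kn : Nat) :
    ∀ (i : Nat), i ≤ piles.length → ∀ (j : Int), 0 ≤ j → j.toNat ≤ kn →
      pvGB piles i j = (pvIter (piles.take i) kn).getD j.toNat 0 := by
  intro i
  induction i with
  | zero =>
    intro _ j _ _
    simp only [pvGB, List.take_zero]
    rw [show pvIter [] kn = List.replicate (kn+1) (0:Int) from rfl, pvGetD_replicate_zero]
  | succ i ih =>
    intro hi j hj0 hjkn
    have hilt : i < piles.length := by omega
    have hp := pvPyGet_in_range piles i hilt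
    set p := piles.getD i [] with hpdef
    set prev := pvIter (piles.take i) kn with hprev
    set jn := j.toNat with hjn
    have hj : j = (jn : Int) := by omega
    set mn := min jn p.length with hmn
    have hgood := pvIter_good (piles.take i) kn
    have hrange : PySem.List.pyRange 1 (min j ((p.length : Nat) : Int) + 1) 1
        = (List.range mn).map (fun t : Nat => 1 + (t : Int)) := by
      rw [PySem.List.pyRange_one,
        show (min j ((p.length : Nat) : Int) + 1 - 1).toNat = mn from by omega]
    have hG : ∀ t : Nat, t < mn →
        pvGB piles i (j - (1 + (t : Int))) + pvPref p (t+1)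
          = prev.getD (jn - (t+1)) 0 + pvPref p (t+1) := by
      intro t ht
      rw [ih (by omega) (j - (1 + (t : Int))) (by omega) (by omega)]
      congr 2
      omega
    have hGj : pvGB piles i j = prev.getD jn 0 := ih (by omega) j hj0 hjkn
    have hrhs : (pvIter (piles.take (i+1)) kn).getD jn 0
        = (List.range mn).foldl
            (fun b t => max b (prev.getD (jn - (t+1)) 0 + pvPref p (t+1))) (prev.getD jn 0) := by
      rw [pvIter_take_succ piles kn i hilt, ← hprev, ← hpdef,
        pvRowSpec_getD kn prev p jn hjkn]
      unfold pvBest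
      rw [← hmn, List.range_succ_eq_map, List.foldl_cons, List.foldl_map]
      rw [show jn - 0 = jn from rfl, show pvPref p 0 = 0 from rfl, add_zero,
        max_eq_right (hgood.2.2 jn)]
    rw [hrhs]
    simp only [pvGB]
    rw [hp, hrange, List.foldl_map]
    have := pvPureFoldInv (pvGB piles i)
      (fun t => prev.getD (jn - (t+1)) 0 + pvPref p (t+1)) p j mn (by omega) hG mn le_rfl
      (pvGB piles i j)
    rw [this, hGj]

theorem pvBEq (piles : List (List Int)) (k : Int) (hk : 0 ≤ k) :
    maxValueOfCoins_alt piles k = (pvIter piles k.toNat).getD k.toNat 0 := by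
  simp only [maxValueOfCoins_alt]
  rw [(pvMemoSpec piles piles.length k PySem.Dict.empty (pvMemoOK_empty piles)).1]
  rw [pvGB_row piles k.toNat piles.length le_rfl k hk le_rfl, List.take_length]

-- ===== VERDICT (by name: the statement is the Claim_ definition above) =====
theorem maxValueOfCoins_spec : Claim_equal_maxValueOfCoins := by
  intro piles k _hdom hpre
  unfold Spec_maxValueOfCoins
  rw [pvAEq, pvBEq piles k hpre]
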